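-- pv_equiv track=rewrite | github.com/Sam-Zozo/thesis_chat_app | filter_sentence.py | isAllVowels
-- ===== SOURCE A (Python) =====
-- def isAllVowels(word):
--     count = 0
--     for c in word:
--         if c in "aeiou":
--             count+=1
--     if count == len(word):
--         return True
--     else:
--         return False
-- ===== SOURCE B (Python) =====
-- def isAllVowels(word):
--     return set(word) <= set("aeiou")
-- ===== Notes on version B (the rewrite author's own statement) =====
-- stated objective: idiomatic
-- what changed: Replaces the count-every-vowel-then-compare-to-length loop with a single set-subset test between the word's distinct characters and the vowel set.
import Mathlib
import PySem

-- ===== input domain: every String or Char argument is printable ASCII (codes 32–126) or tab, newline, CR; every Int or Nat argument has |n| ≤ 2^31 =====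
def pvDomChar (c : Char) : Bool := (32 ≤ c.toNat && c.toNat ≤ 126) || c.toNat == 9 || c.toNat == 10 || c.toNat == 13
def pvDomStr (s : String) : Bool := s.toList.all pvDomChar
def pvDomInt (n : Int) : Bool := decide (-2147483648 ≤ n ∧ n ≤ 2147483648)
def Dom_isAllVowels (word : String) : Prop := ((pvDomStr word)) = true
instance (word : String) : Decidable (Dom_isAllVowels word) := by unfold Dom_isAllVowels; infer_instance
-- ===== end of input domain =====

-- B replaces A's count-vowels-then-compare-to-length loop by a set-subset test (idiomatic).

-- ===== PORT A =====
def isAllVowels (word : String) : Bool :=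
  let count : Int :=
    word.toList.foldl (fun n c => if ("aeiou".toList).contains c then n + 1 else n) 0
  if count = (word.toList.length : Int) then true else false

-- ===== PORT B =====
def isAllVowels_alt (word : String) : Bool :=
  PySem.Set.issubset (PySem.Set.ofList word.toList) (PySem.Set.ofList "aeiou".toList)

-- ===== PRECONDITION & SPEC =====
def Spec_isAllVowels (word : String) (out : Bool) : Prop := out = isAllVowels_alt word
instance (word : String) (out : Bool) : Decidable (Spec_isAllVowels word out) := by unfold Spec_isAllVowels; infer_instance

-- ===== CLAIM (what is proved, stated in full; the proofs are below) =====
def Claim_equal_isAllVowels : Prop := ∀ (word : String), Dom_isAllVowels word → Spec_isAllVowels word (isAllVowels word)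

-- ===== LEMMAS AND PROOFS =====

theorem pv_count_eq (l : List Char) (n : Int) :
    l.foldl (fun n c => if ("aeiou".toList).contains c then n + 1 else n) n
      = n + l.countP (fun c => ("aeiou".toList).contains c) := by
  induction l generalizing n with
  | nil => simp
  | cons c t ih =>
    simp only [List.foldl_cons, List.countP_cons, ih]
    split_ifs with h <;> simp [h] <;> omega

theorem pv_a_eq_all (l : List Char) :
    (if (l.foldl (fun n c => if ("aeiou".toList).contains c then n + 1 else n) (0:Int))
        = (l.length : Int) then true else false)
      = l.all (fun c => ("aeiou".toList).contains c) := by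
  rw [pv_count_eq]
  by_cases h : l.all (fun c => ("aeiou".toList).contains c)
  · have hc : l.countP (fun c => ("aeiou".toList).contains c) = l.length :=
      List.countP_eq_length.mpr (fun a ha => List.all_eq_true.mp h a ha)
    rw [if_pos (by omega), h]
  · have hne : l.countP (fun c => ("aeiou".toList).contains c) ≠ l.length := by
      intro heq
      exact h (List.all_eq_true.mpr (fun a ha => List.countP_eq_length.mp heq a ha))
    rw [if_neg (by omega)]
    simp only [Bool.not_eq_true] at h
    rw [h]

theorem pv_subset_eq_all (l : List Char) :
    PySem.Set.issubset (PySem.Set.ofList l) (PySem.Set.ofList "aeiou".toList)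
      = l.all (fun c => ("aeiou".toList).contains c) := by
  simp only [PySem.Set.issubset, PySem.Set.contains]
  rw [Bool.eq_iff_iff]
  simp only [List.all_eq_true]
  constructor
  · intro h a ha; exact h a ((PySem.Set.mem_ofList _ _).mpr ha)
  · intro h a ha; exact h a ((PySem.Set.mem_ofList _ _).mp ha)

-- ===== VERDICT (by name: the statement is the Claim_ definition above) =====
theorem isAllVowels_spec : Claim_equal_isAllVowels := by
  intro word _
  unfold Spec_isAllVowels isAllVowels isAllVowels_alt
  rw [pv_subset_eq_all, pv_a_eq_all]
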